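-- pv_equiv track=rewrite | github.com/vutikurishanmukha9/resume_app | app.py | get_missing_keywords
-- ===== SOURCE A (Python) =====
-- from typing import Tuple, List, Dict, Any
-- from collections import Counter
--
-- def get_missing_keywords(resume_keywords: List[str], jd_keywords: List[str]) -> Dict[str, List[str]]:
--     """
--     Identify keywords present in JD but missing from resume.
--     Returns keywords categorized by importance (critical, important, optional).
--     """
--     if not jd_keywords:
--         return {'critical': [], 'important': [], 'optional': []}
--
--     resume_set = set(kw.lower() for kw in resume_keywords)
--     jd_counter = Counter(jd_keywords)
--
--     missing = []
--     for keyword, count in jd_counter.items():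
--         if keyword.lower() not in resume_set:
--             missing.append((keyword, count))
--
--     # Sort by frequency
--     missing.sort(key=lambda x: x[1], reverse=True)
--
--     # Categorize by frequency
--     total_missing = len(missing)
--     if total_missing == 0:
--         return {'critical': [], 'important': [], 'optional': []}
--
--     # Top 30% are critical, next 40% are important, rest are optional
--     critical_count = max(1, int(total_missing * 0.3))
--     important_count = max(1, int(total_missing * 0.4))
--
--     categorized = {
--         'critical': [kw for kw, _ in missing[:critical_count]],
--         'important': [kw for kw, _ in missing[critical_count:critical_count + important_count]],
--         'optional': [kw for kw, _ in missing[critical_count + important_count:]]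
--     }
--
--     return categorized
-- ===== SOURCE B (Python) =====
-- from typing import List, Dict
-- from collections import Counter
--
-- def get_missing_keywords(resume_keywords: List[str], jd_keywords: List[str]) -> Dict[str, List[str]]:
--     """
--     Identify keywords present in JD but missing from resume, categorized by
--     importance — bucket (counting-sort) formulation instead of a comparison sort.
--     """
--     empty = {'critical': [], 'important': [], 'optional': []}
--     if not jd_keywords:
--         return empty
--
--     resume_set = {kw.lower() for kw in resume_keywords}
--
--     # Bucket missing keywords by their JD frequency, keeping first-seen order.
--     buckets: Dict[int, List[str]] = {}
--     for keyword, count in Counter(jd_keywords).items():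
--         if keyword.lower() not in resume_set:
--             buckets.setdefault(count, []).append(keyword)
--
--     # Emit buckets from highest to lowest count: a stable descending ranking.
--     ranked: List[str] = []
--     for count in sorted(buckets, reverse=True):
--         ranked.extend(buckets[count])
--
--     n = len(ranked)
--     if n == 0:
--         return empty
--
--     crit = max(1, 3 * n // 10)
--     imp = max(1, 4 * n // 10)
--     return {
--         'critical': ranked[:crit],
--         'important': ranked[crit:crit + imp],
--         'optional': ranked[crit + imp:],
--     }
-- ===== Notes on version B (the rewrite author's own statement) =====
-- stated objective: alternative
-- what changed: Replaces the stable reverse comparison sort of (keyword,count) pairs with a counting-sort: keywords are bucketed by frequency in first-seen order and buckets are emitted in descending count order; the float expressions int(n*0.3)/int(n*0.4) become the exactly-equal integer 3*n//10 and 4*n//10.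
import Mathlib
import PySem

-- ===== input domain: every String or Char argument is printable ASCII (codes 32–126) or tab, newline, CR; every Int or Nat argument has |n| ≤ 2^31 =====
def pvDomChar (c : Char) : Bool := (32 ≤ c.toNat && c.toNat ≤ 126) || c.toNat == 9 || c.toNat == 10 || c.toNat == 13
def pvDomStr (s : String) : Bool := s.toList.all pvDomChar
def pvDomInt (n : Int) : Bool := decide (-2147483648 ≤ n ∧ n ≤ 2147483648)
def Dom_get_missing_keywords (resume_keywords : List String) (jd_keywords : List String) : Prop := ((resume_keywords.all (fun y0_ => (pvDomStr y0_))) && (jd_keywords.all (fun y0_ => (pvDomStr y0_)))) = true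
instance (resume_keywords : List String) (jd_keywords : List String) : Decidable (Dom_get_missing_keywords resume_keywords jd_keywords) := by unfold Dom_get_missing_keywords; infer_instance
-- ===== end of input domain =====

-- B replaces A's stable reverse sort of (keyword, count) pairs by a counting-sort
-- (frequency buckets emitted in descending count order); same return value, similar cost.


-- ===== PORT A =====
def get_missing_keywords (resume_keywords : List String) (jd_keywords : List String) : List (String × List String) :=
  if jd_keywords = [] then [("critical", []), ("important", []), ("optional", [])]
  else
    let resume_set : PySem.Set String := PySem.Set.ofList (resume_keywords.map PySem.Str.lower)
    let jd_counter : PySem.Dict String Int := PySem.Dict.counter jd_keywords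
    let missing : List (String × Int) := jd_counter.items.foldl
      (fun acc kc => if !resume_set.contains (PySem.Str.lower kc.1) then acc ++ [kc] else acc) []
    let missing := PySem.List.sorted missing (fun x => x.2) true
    let total_missing : Int := missing.length
    if total_missing = 0 then [("critical", []), ("important", []), ("optional", [])]
    else
      -- int(total_missing * 0.3): ported exactly as floor(3n/10) — float64 0.3 (resp. 0.4) has
      -- relative error ≈ 3.7e-17 (2.2e-17), below half an ulp, so int(n*0.3) = 3n//10, int(n*0.4) = 4n//10
      let critical_count : Int := max 1 (PySem.Int.floordiv (total_missing * 3) 10)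
      let important_count : Int := max 1 (PySem.Int.floordiv (total_missing * 4) 10)
      [("critical", (PySem.List.slice missing none (some critical_count)).map (·.1)),
       ("important", (PySem.List.slice missing (some critical_count) (some (critical_count + important_count))).map (·.1)),
       ("optional", (PySem.List.slice missing (some (critical_count + important_count)) none).map (·.1))]

-- ===== PORT B =====
def get_missing_keywords_alt (resume_keywords : List String) (jd_keywords : List String) : List (String × List String) :=
  let empty : List (String × List String) := [("critical", []), ("important", []), ("optional", [])]
  if jd_keywords = [] then empty
  else
    let resume_set : PySem.Set String := PySem.Set.ofList (resume_keywords.map PySem.Str.lower)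
    -- buckets.setdefault(count, []).append(keyword)  ==  d[count] = d.get(count, []) ++ [keyword]
    let buckets : PySem.Dict Int (List String) := (PySem.Dict.counter jd_keywords).items.foldl
      (fun d kc => if !resume_set.contains (PySem.Str.lower kc.1)
                   then d.modify kc.2 [] (fun l => l ++ [kc.1]) else d)
      PySem.Dict.empty
    let ranked : List String := (PySem.List.sorted buckets.keys (fun c => c) true).foldl
      (fun acc c => acc ++ buckets.getD c []) []
    let n := ranked.length
    if n = 0 then empty
    else
      let crit := max 1 (3 * n / 10)
      let imp := max 1 (4 * n / 10)
      [("critical", ranked.take crit),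
       ("important", (ranked.drop crit).take imp),
       ("optional", ranked.drop (crit + imp))]

-- ===== PRECONDITION & SPEC =====
def Spec_get_missing_keywords (resume_keywords : List String) (jd_keywords : List String) (out : List (String × List String)) : Prop := out = get_missing_keywords_alt resume_keywords jd_keywords
instance (resume_keywords : List String) (jd_keywords : List String) (out : List (String × List String)) : Decidable (Spec_get_missing_keywords resume_keywords jd_keywords out) := by unfold Spec_get_missing_keywords; infer_instance

-- ===== CLAIM (what is proved, stated in full; the proofs are below) =====
def Claim_equal_get_missing_keywords : Prop := ∀ (resume_keywords : List String) (jd_keywords : List String), Dom_get_missing_keywords resume_keywords jd_keywords → Spec_get_missing_keywords resume_keywords jd_keywords (get_missing_keywords resume_keywords jd_keywords)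

-- ===== LEMMAS AND PROOFS =====

-- insertBy passes over a prefix none of whose elements x goes before
theorem pv_insertBy_append_not {α : Type} (before : α → α → Bool) (x : α) (pre rest : List α)
    (h : ∀ y ∈ pre, before x y = false) :
    PySem.List.insertBy before x (pre ++ rest) = pre ++ PySem.List.insertBy before x rest := by
  induction pre with
  | nil => simp
  | cons y ys ih =>
    simp only [List.cons_append, PySem.List.insertBy, h y (by simp)]
    simp only [Bool.false_eq_true, if_false, List.cons.injEq, true_and]
    exact ih (fun z hz => h z (by simp [hz]))

-- insertBy prepends when x goes before every element
theorem pv_insertBy_all_before {α : Type} (before : α → α → Bool) (x : α) (l : List α)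
    (h : ∀ y ∈ l, before x y = true) :
    PySem.List.insertBy before x l = x :: l := by
  cases l with
  | nil => rfl
  | cons y ys => simp [PySem.List.insertBy, h y (by simp)]

-- inserting x into a descending bucket concatenation lands at the end of its own bucket
theorem pv_insertBy_flatMap {β : Type} (key : β → Int) (x : β) (ds : List Int) (F : Int → List β)
    (hds : ds.Pairwise (· > ·)) (hF : ∀ c ∈ ds, ∀ y ∈ F c, key y = c) (hx : key x ∈ ds) :
    PySem.List.insertBy (fun a b => decide (key b < key a)) x (ds.flatMap F)
      = ds.flatMap (fun c => if key x = c then F c ++ [x] else F c) := by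
  induction ds with
  | nil => cases hx
  | cons c ds ih =>
    simp only [List.flatMap_cons]
    rcases List.pairwise_cons.mp hds with ⟨hgt, hds'⟩
    by_cases hc : key x = c
    · rw [pv_insertBy_append_not _ _ _ _ (fun y hy => by
        simp [hF c (by simp) y hy, hc])]
      rw [pv_insertBy_all_before _ _ _ (fun y hy => by
        rcases List.mem_flatMap.mp hy with ⟨c', hc', hy'⟩
        simp only [decide_eq_true_eq]
        rw [hF c' (by simp [hc']) y hy', hc]
        exact hgt c' hc')]
      rw [if_pos hc]
      have : (ds.flatMap fun c' => if key x = c' then F c' ++ [x] else F c') = ds.flatMap F := by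
        apply List.flatMap_congr
        intro c' hc'
        rw [if_neg (by rw [hc]; exact ne_of_gt (hgt c' hc'))]
      rw [this]
      simp
    · have hx' : key x ∈ ds := by
        rcases List.mem_cons.mp hx with h | h
        · exact absurd h hc
        · exact h
      rw [pv_insertBy_append_not _ _ _ _ (fun y hy => by
        have := hF c (by simp) y hy
        simp only [decide_eq_false_iff_not, not_lt, this]
        exact le_of_lt (hgt _ hx'))]
      rw [ih hds' (fun c' h' y hy => hF c' (by simp [h']) y hy) hx', if_neg hc]

-- stable descending sort = descending-bucket concatenation
theorem pv_sorted_rev_eq_flatMap {β : Type} (key : β → Int) (xs : List β) (ds : List Int)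
    (hds : ds.Pairwise (· > ·)) (hmem : ∀ x ∈ xs, key x ∈ ds) :
    PySem.List.sorted xs key true = ds.flatMap (fun c => xs.filter (fun x => key x == c)) := by
  induction xs using List.reverseRecOn with
  | nil => simp [PySem.List.sorted]
  | append_singleton xs x ih =>
    rw [PySem.List.sorted_rev_eq_foldl_insertBy, List.foldl_append, List.foldl_cons, List.foldl_nil,
        ← PySem.List.sorted_rev_eq_foldl_insertBy,
        ih (fun y hy => hmem y (List.mem_append_left _ hy)),
        pv_insertBy_flatMap key x ds (fun c => xs.filter (fun x => key x == c)) hds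
          (fun c _ y hy => by simpa using (List.mem_filter.mp hy).2)
          (hmem x (by simp))]
    apply List.flatMap_congr
    intro c hc
    by_cases h : key x = c
    · simp [List.filter_append, h]
    · simp [List.filter_append, h]

-- the bucket dict: lookup at c collects, in order, the first components of the pairs with count c
theorem pv_buckets_getD (ps : List (String × Int)) (d : PySem.Dict Int (List String)) (c : Int) :
    (ps.foldl (fun d kc => d.modify kc.2 [] (fun l => l ++ [kc.1])) d).getD c []
      = d.getD c [] ++ (ps.filter (fun kc => kc.2 == c)).map (·.1) := by
  induction ps generalizing d with
  | nil => simp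
  | cons kc ps ih =>
    simp only [List.foldl_cons, ih, List.filter_cons]
    by_cases h : kc.2 = c
    · simp [PySem.Dict.modify, h]
    · simp [PySem.Dict.modify, PySem.Dict.getD_insert, h, Ne.symm h]

-- strict descending order of the sorted distinct-count list
theorem pv_ds_pairwise (K : List Int) (hK : K.Nodup) :
    (PySem.List.sorted K (fun c => c) true).Pairwise (· > ·) := by
  have h1 := PySem.List.sorted_pairwise_rev K (fun c : Int => c)
  have h2 : (PySem.List.sorted K (fun c : Int => c) true).Nodup :=
    (PySem.List.sorted_perm K (fun c : Int => c) true).symm.nodup hK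
  exact (h1.and h2).imp (fun h => lt_of_le_of_ne h.1 (Ne.symm h.2))

theorem pv_floordiv3_cast (m : Nat) :
    PySem.Int.floordiv ((m : Int) * 3) 10 = ((3 * m / 10 : Nat) : Int) := by
  rw [PySem.Int.floordiv, Int.fdiv_eq_ediv, if_pos (Or.inl (by norm_num)), sub_zero]
  omega

theorem pv_floordiv4_cast (m : Nat) :
    PySem.Int.floordiv ((m : Int) * 4) 10 = ((4 * m / 10 : Nat) : Int) := by
  rw [PySem.Int.floordiv, Int.fdiv_eq_ediv, if_pos (Or.inl (by norm_num)), sub_zero]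
  omega

-- ===== VERDICT (by name: the statement is the Claim_ definition above) =====
theorem get_missing_keywords_spec : Claim_equal_get_missing_keywords := by
  intro rs js _
  show get_missing_keywords rs js = get_missing_keywords_alt rs js
  by_cases hjs : js = []
  · simp [get_missing_keywords, get_missing_keywords_alt, hjs]
  · unfold get_missing_keywords get_missing_keywords_alt
    simp only [if_neg hjs]
    rw [PySem.List.foldl_append_if, ← List.foldl_filter,
        PySem.Dict.keys_foldl_modify_key, PySem.List.foldl_append_eq_flatMap]
    simp only [List.nil_append, List.map_id_fun', pv_buckets_getD]
    have hemptyD : ∀ c : Int, (PySem.Dict.empty : PySem.Dict Int (List String)).getD c [] = [] :=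
      fun c => by simp
    have hemptyK : (PySem.Dict.empty : PySem.Dict Int (List String)).keys = ([] : List Int) := by simp
    simp only [hemptyD, hemptyK, List.nil_append, PySem.Set.update_nil_left, id_eq]
    generalize (List.filter
      (fun kc => !(PySem.Set.ofList (List.map PySem.Str.lower rs)).contains (PySem.Str.lower kc.1))
      (PySem.Dict.counter js).items) = M
    have hds : (PySem.List.sorted (PySem.Set.ofList (List.map Prod.snd M)) (fun c => c) true).Pairwise (· > ·) :=
      pv_ds_pairwise _ (PySem.Set.nodup_ofList _)
    have hmem : ∀ x ∈ M, x.2 ∈ PySem.List.sorted (PySem.Set.ofList (List.map Prod.snd M)) (fun c => c) true :=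
      fun x hx => (PySem.List.mem_sorted _ _ _ _).mpr
        ((PySem.Set.mem_ofList _ _).mpr (List.mem_map.mpr ⟨x, hx, rfl⟩))
    rw [← List.map_flatMap,
        ← pv_sorted_rev_eq_flatMap (fun x : String × Int => x.2) M
          (PySem.List.sorted (PySem.Set.ofList (List.map Prod.snd M)) (fun c => c) true) hds hmem]
    generalize PySem.List.sorted M (fun x => x.2) true = S
    simp only [List.length_map, Int.natCast_eq_zero]
    by_cases h0 : S.length = 0
    · simp [h0]
    · simp only [if_neg h0]
      rw [pv_floordiv3_cast, pv_floordiv4_cast]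
      simp only [show ((1:Int)) = ((1:Nat):Int) from rfl, ← Nat.cast_max, ← Nat.cast_add,
        PySem.List.slice_to_natCast, PySem.List.slice_natCast, PySem.List.slice_from_natCast]
      simp [List.map_take, List.map_drop]
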